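-- pv_equiv track=rewrite | github.com/nathancole636-ui/my_lead_poet | miner_models/tri_key_pipeline/main.py | _is_generic_email
-- ===== SOURCE A (Python) =====
-- GENERIC_EMAIL_PREFIXES = {
--     "info", "hello", "support", "contact", "sales", "admin", "office",
--     "team", "service", "help", "careers", "hr", "billing", "privacy",
-- }
--
-- def _is_generic_email(email: str) -> bool:
--     if not email or "@" not in email:
--         return True
--     local = email.split("@", 1)[0].lower()
--     # Allow firstname.lastname, firstname, firstlast patterns etc.
--     if local in GENERIC_EMAIL_PREFIXES:
--         return True
--     if any(local.startswith(p + "+") for p in GENERIC_EMAIL_PREFIXES):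
--         return True
--     return False
-- ===== SOURCE B (Python) =====
-- GENERIC_EMAIL_PREFIXES = {
--     "info", "hello", "support", "contact", "sales", "admin", "office",
--     "team", "service", "help", "careers", "hr", "billing", "privacy",
-- }
--
-- def _is_generic_email(email: str) -> bool:
--     if not email or "@" not in email:
--         return True
--     local = email.split("@", 1)[0].lower()
--     # Strip an optional '+tag' suffix, then do one set lookup instead of
--     # a membership test plus a scan with startswith over the whole set.
--     i = local.find("+")
--     key = local if i < 0 else local[:i]
--     return key in GENERIC_EMAIL_PREFIXES
-- ===== Notes on version B (the rewrite author's own statement) =====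
-- stated objective: simpler
-- what changed: Instead of testing the whole local-part for set membership and then scanning every generic prefix with a startswith test, B strips the optional plus-tag suffix from the local-part once and does a single set lookup.
import Mathlib
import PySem

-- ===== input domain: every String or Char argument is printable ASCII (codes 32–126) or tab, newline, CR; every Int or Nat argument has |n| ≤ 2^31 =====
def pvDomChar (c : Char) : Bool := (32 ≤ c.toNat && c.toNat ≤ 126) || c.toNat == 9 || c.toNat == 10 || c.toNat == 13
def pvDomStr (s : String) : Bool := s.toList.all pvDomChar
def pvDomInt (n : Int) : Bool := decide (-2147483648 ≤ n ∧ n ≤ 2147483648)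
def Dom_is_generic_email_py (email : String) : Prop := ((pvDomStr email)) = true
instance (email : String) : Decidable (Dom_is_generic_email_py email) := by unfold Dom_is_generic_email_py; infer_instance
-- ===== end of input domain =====

-- B replaces A's set-membership test plus a startswith scan over the whole prefix set
-- by extracting the key before the first '+' once and doing a single lookup (objective: simpler).

-- ===== PORT A =====
def genericPrefixes : PySem.Set String := PySem.Set.ofList
  ["info", "hello", "support", "contact", "sales", "admin", "office",
   "team", "service", "help", "careers", "hr", "billing", "privacy"]

def is_generic_email_py (email : String) : Bool :=
  if email == "" || !(PySem.Str.isIn "@" email) then true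
  else
    let locl := PySem.Str.lower (((PySem.Str.splitMax? email "@" 1).getD []).headD "")
    if PySem.Set.contains genericPrefixes locl then true
    else if genericPrefixes.any (fun p => PySem.Str.startswith locl (p ++ "+")) then true
    else false

-- ===== PORT B =====
def is_generic_email_py_alt (email : String) : Bool :=
  if email == "" || !(PySem.Str.isIn "@" email) then true
  else
    let locl := PySem.Str.lower (((PySem.Str.splitMax? email "@" 1).getD []).headD "")
    let i := PySem.Str.find locl "+"
    let key := if i < 0 then locl else PySem.Str.slice locl none (some i)
    PySem.Set.contains genericPrefixes key

-- ===== PRECONDITION & SPEC =====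
def Spec_is_generic_email_py (email : String) (out : Bool) : Prop := out = is_generic_email_py_alt email
instance (email : String) (out : Bool) : Decidable (Spec_is_generic_email_py email out) := by unfold Spec_is_generic_email_py; infer_instance

-- ===== CLAIM (what is proved, stated in full; the proofs are below) =====
def Claim_equal_is_generic_email_py : Prop := ∀ (email : String), Dom_is_generic_email_py email → Spec_is_generic_email_py email (is_generic_email_py email)

-- ===== LEMMAS AND PROOFS =====

theorem str_beq_iff_toList (s t : String) : (s == t) = true ↔ s.toList = t.toList := by
  rw [beq_iff_eq]; exact ⟨fun h => by rw [h], fun h => by ext1; exact h⟩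

theorem set_contains_eq (xs : List String) (x : String) :
    PySem.Set.contains xs x = xs.contains x := by
  simp [PySem.Set.contains]

theorem if_if_or (a b : Bool) : (if a then true else if b then true else false) = (a || b) := by
  cases a <;> cases b <;> rfl

theorem bool_or4 (a b c d : Bool) : ((a || b) || (c || d)) = ((a || c) || (b || d)) := by
  cases a <;> cases b <;> cases c <;> cases d <;> rfl

-- one prefix p without '+': "cs == p or cs startswith p+'+'"  ⟺  "key of cs == p"
theorem step_lemma (cs p : String) (hp : '+' ∉ p.toList) :
    ((cs == p) || PySem.Str.startswith cs (p ++ "+"))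
    = ((if PySem.Str.find cs "+" < 0 then cs
        else PySem.Str.slice cs none (some (PySem.Str.find cs "+"))) == p) := by
  have hfind_eq : PySem.Str.find cs "+" = PySem.Chars.find cs.toList ['+'] := by
    simp only [PySem.Str.find_eq]; rfl
  have h2 : (p ++ "+").toList = p.toList ++ ['+'] := by simp
  have hsw_eq : PySem.Str.startswith cs (p ++ "+")
      = PySem.Chars.startswith cs.toList (p.toList ++ ['+']) := by
    simp only [PySem.Str.startswith_eq]; rw [h2]
  by_cases hneg : PySem.Str.find cs "+" < 0
  · rw [if_pos hneg]
    have hfind : PySem.Chars.find cs.toList ['+'] = -1 := by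
      have h1 := PySem.Chars.neg_one_le_find cs.toList ['+']
      rw [hfind_eq] at hneg; omega
    have hni : ¬ (['+'] <:+: cs.toList) := (PySem.Chars.find_eq_neg_one_iff _ _).mp hfind
    have hsw : PySem.Str.startswith cs (p ++ "+") = false := by
      rw [hsw_eq]
      by_contra h
      rw [Bool.not_eq_false, PySem.Chars.startswith_iff] at h
      exact hni (((List.suffix_append p.toList ['+']).isInfix).trans h.isInfix)
    rw [hsw, Bool.or_false]
  · rw [if_neg hneg]
    rw [not_lt] at hneg
    rw [hfind_eq] at hneg ⊢
    obtain ⟨hpre, hmin⟩ := PySem.Chars.find_spec (s := cs.toList) (sub := ['+']) hneg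
    set n := (PySem.Chars.find cs.toList ['+']).toNat with hn
    have hgetn : cs.toList[n]? = some '+' := by
      have hh : (cs.toList.drop n).head? = some '+' := by
        rcases hpre with ⟨t, ht⟩; rw [← ht]; rfl
      rwa [List.head?_drop] at hh
    have hkey : (PySem.Str.slice cs none (some (PySem.Chars.find cs.toList ['+']))).toList
        = cs.toList.take n := by
      rw [hn]; simp [PySem.List.slice_to _ hneg]
    rw [Bool.eq_iff_iff, Bool.or_eq_true, str_beq_iff_toList, str_beq_iff_toList, hkey, hsw_eq,
      PySem.Chars.startswith_iff]
    have hne : cs.toList ≠ p.toList := by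
      intro h
      exact hp (h ▸ List.mem_of_getElem? hgetn)
    constructor
    · rintro (h | h)
      · exact absurd h hne
      · -- p.toList ++ ['+'] <+: cs.toList  →  take n = p.toList
        rcases h with ⟨r, hr⟩
        rw [List.append_assoc] at hr
        simp only [List.singleton_append] at hr
        have hdm : cs.toList.drop p.toList.length = '+' :: r := by
          rw [← hr, List.drop_left]
        have h1 : ¬ (p.toList.length < n) := fun hlt => hmin _ hlt ⟨r, by rw [List.singleton_append, hdm]⟩
        have h2 : ¬ (n < p.toList.length) := by
          intro hlt
          apply hp
          have hq : cs.toList[n]? = p.toList[n]? := by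
            rw [← hr, List.getElem?_append_left hlt]
          rw [hq] at hgetn
          exact List.mem_of_getElem? hgetn
        have hnm : n = p.toList.length := by omega
        rw [hnm, ← hr, List.take_left]
    · -- take n = p.toList  →  p.toList ++ ['+'] <+: cs.toList
      intro htake
      right
      obtain ⟨hlen, hget⟩ := List.getElem?_eq_some_iff.mp hgetn
      refine ⟨cs.toList.drop (n + 1), ?_⟩
      rw [List.append_assoc]
      simp only [List.singleton_append]
      calc p.toList ++ '+' :: cs.toList.drop (n + 1)
          = cs.toList.take n ++ cs.toList.drop n := by
            rw [htake, List.drop_eq_getElem_cons hlen, hget]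
        _ = cs.toList := List.take_append_drop _ _

theorem main_lemma (cs : String) (P : List String) (hP : ∀ p ∈ P, '+' ∉ p.toList) :
    (P.contains cs || P.any (fun p => PySem.Str.startswith cs (p ++ "+")))
    = P.contains (if PySem.Str.find cs "+" < 0 then cs
                  else PySem.Str.slice cs none (some (PySem.Str.find cs "+"))) := by
  induction P with
  | nil => rfl
  | cons p P ih =>
    have hstep := step_lemma cs p (hP p (by simp))
    have hih := ih (fun q hq => hP q (by simp [hq]))
    simp only [List.contains_cons, List.any_cons]
    rw [bool_or4, hstep, hih]

-- ===== VERDICT (by name: the statement is the Claim_ definition above) =====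
set_option maxHeartbeats 1000000 in
theorem is_generic_email_py_spec : Claim_equal_is_generic_email_py := by
  intro email _
  unfold Spec_is_generic_email_py is_generic_email_py is_generic_email_py_alt
  by_cases hg : (email == "" || !(PySem.Str.isIn "@" email)) = true
  · rw [if_pos hg, if_pos hg]
  · rw [if_neg hg, if_neg hg]
    dsimp only
    rw [if_if_or]
    have hP : ∀ p ∈ genericPrefixes, '+' ∉ p.toList := by decide
    rw [set_contains_eq, set_contains_eq, main_lemma _ genericPrefixes hP]
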